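-- pv_equiv track=rewrite | github.com/italoptes/estrutura-de-dados | Estrutura 2/coletor_moedas.py | coletor
-- ===== SOURCE A (Python) =====
-- def coletor(C):
--     # C é o tabuleiro original, onde cada posição C[i][j] indica se há moeda (1) ou não (0)
--     # F é uma matriz auxiliar que guarda o maior número de moedas que o robô pode coletar até cada casa
--
--     n = len(C)      #linhas
--     m = len(C[0])   #colunas
--
--     F = [[0 for _ in range(m)] for _ in range(n)] #Cria a matriz F cheia de zeros(mesmo tamanho de C)
--     #Essa matriz vai sendo preenchida ao decorrer dos casos
--
--     F[0][0] = C[0][0]   #Caso base: primeira e mais simplificada opção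
--
--     for j in range(1, m):    #Preenche a primeira linha, iniciando do 1 até m
--         F[0][j] = C[0][j] + F[0][j-1]
--
--     for i in range(1, n):   #Preenche a primeira coluna, iniciando do 1 até n
--         F[i][0] = C[i][0] + F[i-1][0]
--
--     for i in range(1, n):    #Preenche o restante da matriz
--         for j in range(1, m):
--             F[i][j] = C[i][j] + max(F[i-1][j], F[i][j-1])
--             #C[i][j]: moeda atual
--             #max(...): escolhe o melhor caminho (de cima ou da esquerda)
--             #F[i][j]: total máximo de moedas coletadas até essa posição
--
--     return F[n-1][m-1]   #Retorna o total máximo de moedas coletadas até o canto inferior direito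
-- ===== SOURCE B (Python) =====
-- def coletor(C):
--     # Top-down memoized recursion: rec(i, j) = max coins collectible on a path
--     # from (0,0) to (i,j); replaces A's bottom-up table with its separate
--     # first-row/first-column seeding loops by one recursive definition.
--     n = len(C)
--     m = len(C[0])
--     memo = {}
--     def rec(i, j):
--         if (i, j) in memo:
--             return memo[(i, j)]
--         if i == 0 and j == 0:
--             v = C[0][0]
--         elif i == 0:
--             v = C[0][j] + rec(0, j - 1)
--         elif j == 0:
--             v = C[i][0] + rec(i - 1, 0)
--         else:
--             v = C[i][j] + max(rec(i - 1, j), rec(i, j - 1))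
--         memo[(i, j)] = v
--         return v
--     return rec(n - 1, m - 1)
-- ===== Notes on version B (the rewrite author's own statement) =====
-- stated objective: alternative
-- what changed: Replaces A's bottom-up table fill with its three separate seeding loops by a top-down memoized recursion rec(i,j) over a dict cache, evaluating only from the target corner backwards.
import Mathlib
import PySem

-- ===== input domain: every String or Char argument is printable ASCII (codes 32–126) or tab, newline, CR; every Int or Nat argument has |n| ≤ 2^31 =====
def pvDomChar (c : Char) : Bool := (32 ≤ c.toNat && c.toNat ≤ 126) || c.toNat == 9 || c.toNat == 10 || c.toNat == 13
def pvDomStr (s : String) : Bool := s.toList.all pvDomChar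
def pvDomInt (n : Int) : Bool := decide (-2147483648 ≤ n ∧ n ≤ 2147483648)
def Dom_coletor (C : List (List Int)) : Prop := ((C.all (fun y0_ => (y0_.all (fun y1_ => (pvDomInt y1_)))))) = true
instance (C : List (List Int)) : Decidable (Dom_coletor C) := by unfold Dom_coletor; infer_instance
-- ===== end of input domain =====

-- B replaces A's bottom-up table (with separate first-row/first-column seeding loops) by a
-- top-down memoized recursion rec(i,j) caching results in a dict.

-- ===== PORT A =====
-- F[i][j] = v  (a no-op when out of range, which never happens under Pre_)
def pvLset2 (F : List (List Int)) (i j : Nat) (v : Int) : List (List Int) :=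
  F.set i ((F.getD i []).set j v)

-- C[i][j] read (always in range under Pre_)
def pvGet2 (C : List (List Int)) (i j : Nat) : Int :=
  (C.getD i []).getD j 0

-- literal port of A: build the n×m zero table F, seed F[0][0], fill the first row, the first
-- column, then the rest; range(1,m) = List.range' 1 (m-1) (loop indices are nonnegative counters)
def coletor (C : List (List Int)) : Int :=
  let n := C.length
  let m := (C.headD []).length
  let F0 := List.replicate n (List.replicate m 0)
  let F1 := pvLset2 F0 0 0 (pvGet2 C 0 0)
  let F2 := (List.range' 1 (m-1)).foldl
      (fun F j => pvLset2 F 0 j (pvGet2 C 0 j + (F.getD 0 []).getD (j-1) 0)) F1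
  let F3 := (List.range' 1 (n-1)).foldl
      (fun F i => pvLset2 F i 0 (pvGet2 C i 0 + (F.getD (i-1) []).getD 0 0)) F2
  let F4 := (List.range' 1 (n-1)).foldl
      (fun F i => (List.range' 1 (m-1)).foldl
        (fun F j => pvLset2 F i j
          (pvGet2 C i j + max ((F.getD (i-1) []).getD j 0) ((F.getD i []).getD (j-1) 0))) F) F3
  (F4.getD (n-1) []).getD (m-1) 0

-- ===== PORT B =====
-- rec(i, j) of Source B: memo hit first, then the four branches in Source B's order, threading the
-- memo dict through the recursive calls and inserting the computed value before returning.
-- (loop/grid indices are nonnegative, so the dict keys (i, j) are Nat × Nat)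
def recB (C : List (List Int)) (i j : Nat) (memo : PySem.Dict (Nat × Nat) Int) :
    Int × PySem.Dict (Nat × Nat) Int :=
  match memo.get? (i, j) with
  | some v => (v, memo)
  | none =>
    if _hi : i = 0 then
      if _hj : j = 0 then
        let v := pvGet2 C 0 0
        (v, memo.insert (i, j) v)
      else
        let r := recB C 0 (j - 1) memo
        let v := pvGet2 C 0 j + r.1
        (v, r.2.insert (i, j) v)
    else if _hj : j = 0 then
      let r := recB C (i - 1) 0 memo
      let v := pvGet2 C i 0 + r.1
      (v, r.2.insert (i, j) v)
    else
      let r1 := recB C (i - 1) j memo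
      let r2 := recB C i (j - 1) r1.2
      let v := pvGet2 C i j + max r1.1 r2.1
      (v, r2.2.insert (i, j) v)
  termination_by i + j
  decreasing_by all_goals omega

def coletor_alt (C : List (List Int)) : Int :=
  let n := C.length
  let m := (C.headD []).length
  (recB C (n-1) (m-1) PySem.Dict.empty).1

-- ===== PRECONDITION & SPEC =====
-- Exactly where Python A returns: C nonempty, its first row nonempty, and every row at least as
-- long as the first (otherwise A raises IndexError); B raises on exactly the same inputs.
def Pre_coletor (C : List (List Int)) : Prop :=
  C ≠ [] ∧ 1 ≤ (C.headD []).length ∧ ∀ row ∈ C, (C.headD []).length ≤ row.length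
instance (C : List (List Int)) : Decidable (Pre_coletor C) := by unfold Pre_coletor; infer_instance
def pvWitness_coletor : List (List Int) := [[0, 1, 1], [1, 0, 1]]

def Spec_coletor (C : List (List Int)) (out : Int) : Prop := out = coletor_alt C
instance (C : List (List Int)) (out : Int) : Decidable (Spec_coletor C out) := by unfold Spec_coletor; infer_instance

-- ===== CLAIM (what is proved, stated in full; the proofs are below) =====
def Claim_equal_coletor : Prop := ∀ (C : List (List Int)), Dom_coletor C → Pre_coletor C → Spec_coletor C (coletor C)

-- ===== LEMMAS AND PROOFS =====

-- the common recurrence both programs compute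
def dpF (C : List (List Int)) : Nat → Nat → Int
  | 0, 0 => pvGet2 C 0 0
  | 0, j+1 => pvGet2 C 0 (j+1) + dpF C 0 j
  | i+1, 0 => pvGet2 C (i+1) 0 + dpF C i 0
  | i+1, j+1 => pvGet2 C (i+1) (j+1) + max (dpF C i (j+1)) (dpF C (i+1) j)

-- getD facts specialised to our uses
theorem getD_set_self {α : Type} (l : List α) (i : Nat) (v d : α) (h : i < l.length) :
    (l.set i v).getD i d = v := by
  simp [List.getD_eq_getElem?_getD, h]

theorem getD_set_ne {α : Type} (l : List α) (i j : Nat) (v d : α) (h : j ≠ i) :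
    (l.set i v).getD j d = l.getD j d := by
  simp [List.getD_eq_getElem?_getD, List.getElem?_set_ne (Ne.symm h)]

theorem getD_replicate {α : Type} (n : Nat) (a : α) (i : Nat) (d : α) :
    (List.replicate n a).getD i d = if i < n then a else d := by
  simp [List.getD_eq_getElem?_getD, List.getElem?_replicate]
  split_ifs <;> simp

-- the entry F[i][j] and the table shape maintained by A
def Etab (F : List (List Int)) (i j : Nat) : Int := (F.getD i []).getD j 0

def ShapeF (n m : Nat) (F : List (List Int)) : Prop :=
  F.length = n ∧ ∀ i < n, (F.getD i []).length = m

theorem shape_lset2 {n m : Nat} {F : List (List Int)} (hF : ShapeF n m F)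
    (i j : Nat) (v : Int) : ShapeF n m (pvLset2 F i j v) := by
  obtain ⟨hlen, hrow⟩ := hF
  refine ⟨by simp [pvLset2, hlen], ?_⟩
  intro i' hi'
  by_cases hii : i' = i
  · subst hii
    by_cases hr : i' < F.length
    · rw [pvLset2, getD_set_self _ _ _ _ hr, List.length_set]
      exact hrow i' hi'
    · rw [pvLset2, List.set_eq_of_length_le (by omega)]
      exact hrow i' hi'
  · rw [pvLset2, getD_set_ne _ _ _ _ _ hii]
    exact hrow i' hi'

theorem Etab_lset2_self {n m : Nat} {F : List (List Int)} (hF : ShapeF n m F)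
    {i j : Nat} (v : Int) (hi : i < n) (hj : j < m) :
    Etab (pvLset2 F i j v) i j = v := by
  obtain ⟨hlen, hrow⟩ := hF
  rw [Etab, pvLset2, getD_set_self _ _ _ _ (by omega)]
  exact getD_set_self _ _ _ _ (by rw [hrow i hi]; exact hj)

theorem Etab_lset2_ne {F : List (List Int)} {i j i' j' : Nat} (v : Int)
    (h : i' ≠ i ∨ j' ≠ j) : Etab (pvLset2 F i j v) i' j' = Etab F i' j' := by
  rcases h with h | h
  · rw [Etab, pvLset2, getD_set_ne _ _ _ _ _ h]; rfl
  · by_cases hii : i' = i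
    · subst hii
      by_cases hr : i' < F.length
      · rw [Etab, pvLset2, getD_set_self _ _ _ _ hr, getD_set_ne _ _ _ _ _ h]; rfl
      · rw [Etab, pvLset2, List.set_eq_of_length_le (by omega)]; rfl
    · rw [Etab, pvLset2, getD_set_ne _ _ _ _ _ hii]; rfl

-- generic loop invariant for foldl over range' 1 k (A's `for x in range(1, k+1)`)
theorem foldl_range'_inv {α : Type} (f : α → Nat → α) (P : Nat → α → Prop) (a : α) :
    ∀ k, P 0 a → (∀ t b, t < k → P t b → P (t+1) (f b (1+t))) →
      P k ((List.range' 1 k).foldl f a)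
  | 0, h0, _ => by simpa
  | (k+1), h0, hstep => by
      rw [List.range'_1_concat, List.foldl_append]
      exact hstep k _ (Nat.lt_succ_self k)
        (foldl_range'_inv f P a k h0 (fun t b ht hb => hstep t b (Nat.lt_succ_of_lt ht) hb))

-- ---------- A side ----------

def Inv1 (C : List (List Int)) (n m t : Nat) (F : List (List Int)) : Prop :=
  ShapeF n m F ∧ (∀ j, j ≤ t → Etab F 0 j = dpF C 0 j) ∧ (∀ i j, 1 ≤ i → Etab F i j = 0)

def Inv2 (C : List (List Int)) (n m t : Nat) (F : List (List Int)) : Prop :=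
  ShapeF n m F ∧ (∀ j, j < m → Etab F 0 j = dpF C 0 j) ∧
    (∀ i, 1 ≤ i → i ≤ t → Etab F i 0 = dpF C i 0) ∧
    (∀ i j, 1 ≤ i → 1 ≤ j → Etab F i j = 0)

def Inv3 (C : List (List Int)) (n m k : Nat) (F : List (List Int)) : Prop :=
  ShapeF n m F ∧ (∀ i j, i ≤ k → j < m → Etab F i j = dpF C i j) ∧
    (∀ i, k < i → i ≤ n - 1 → Etab F i 0 = dpF C i 0) ∧
    (∀ i j, k < i → 1 ≤ j → Etab F i j = 0)

theorem EtabF0 (n m i j : Nat) : Etab (List.replicate n (List.replicate m 0)) i j = 0 := by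
  rw [Etab, getD_replicate]
  split_ifs
  · rw [getD_replicate]; split_ifs <;> rfl
  · rfl

theorem phase1 (C : List (List Int)) (n m : Nat) (hn : 1 ≤ n) (hm : 1 ≤ m) :
    Inv1 C n m (m-1)
      ((List.range' 1 (m-1)).foldl
        (fun F j => pvLset2 F 0 j (pvGet2 C 0 j + (F.getD 0 []).getD (j-1) 0))
        (pvLset2 (List.replicate n (List.replicate m 0)) 0 0 (pvGet2 C 0 0))) := by
  have hsh0 : ShapeF n m (List.replicate n (List.replicate m 0)) := by
    constructor
    · simp
    · intro i hi; rw [getD_replicate]; split_ifs; simp_all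
  apply foldl_range'_inv
  · refine ⟨shape_lset2 hsh0 _ _ _, ?_, ?_⟩
    · intro j hj
      interval_cases j
      rw [Etab_lset2_self hsh0 _ hn hm]
      simp [dpF]
    · intro i j hi
      rw [Etab_lset2_ne _ (Or.inl (by omega))]
      exact EtabF0 n m i j
  · rintro t F ht ⟨hsh, hrow, hzero⟩
    have hval : (F.getD 0 []).getD (1+t-1) 0 = dpF C 0 t := by
      have : 1+t-1 = t := by omega
      rw [this]
      exact hrow t le_rfl
    refine ⟨shape_lset2 hsh _ _ _, ?_, ?_⟩
    · intro j hj
      by_cases hje : j = 1+t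
      · subst hje
        rw [hval, Etab_lset2_self hsh _ hn (by omega)]
        have : (1:Nat)+t = t+1 := by omega
        rw [this]
        simp [dpF]
      · rw [Etab_lset2_ne _ (Or.inr hje)]
        exact hrow j (by omega)
    · intro i j hi
      rw [Etab_lset2_ne _ (Or.inl (by omega))]
      exact hzero i j hi

theorem phase2 (C : List (List Int)) (n m : Nat) (hn : 1 ≤ n) (hm : 1 ≤ m) :
    Inv2 C n m (n-1)
      ((List.range' 1 (n-1)).foldl
        (fun F i => pvLset2 F i 0 (pvGet2 C i 0 + (F.getD (i-1) []).getD 0 0))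
        ((List.range' 1 (m-1)).foldl
          (fun F j => pvLset2 F 0 j (pvGet2 C 0 j + (F.getD 0 []).getD (j-1) 0))
          (pvLset2 (List.replicate n (List.replicate m 0)) 0 0 (pvGet2 C 0 0)))) := by
  apply foldl_range'_inv
  · obtain ⟨hsh, hrow, hzero⟩ := phase1 C n m hn hm
    exact ⟨hsh, fun j hj => hrow j (by omega), fun i hi hi0 => absurd hi0 (by omega),
      fun i j hi hj => hzero i j hi⟩
  · rintro t F ht ⟨hsh, hrow, hcol, hzero⟩
    have hval : (F.getD (1+t-1) []).getD 0 0 = dpF C t 0 := by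
      have h1 : 1+t-1 = t := by omega
      rw [h1]
      rcases Nat.eq_zero_or_pos t with h | h
      · subst h; exact hrow 0 hm
      · exact hcol t h le_rfl
    refine ⟨shape_lset2 hsh _ _ _, ?_, ?_, ?_⟩
    · intro j hj
      rw [Etab_lset2_ne _ (Or.inl (by omega))]
      exact hrow j hj
    · intro i hi hile
      by_cases hie : i = 1+t
      · subst hie
        rw [hval, Etab_lset2_self hsh _ (by omega) hm]
        have : (1:Nat)+t = t+1 := by omega
        rw [this]
        simp [dpF]
      · rw [Etab_lset2_ne _ (Or.inl hie)]
        exact hcol i hi (by omega)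
    · intro i j hi hj
      rw [Etab_lset2_ne _ (Or.inr (by omega))]
      exact hzero i j hi hj

theorem phase3 (C : List (List Int)) (n m : Nat) (hn : 1 ≤ n) (hm : 1 ≤ m) :
    Inv3 C n m (n-1)
      ((List.range' 1 (n-1)).foldl
        (fun F i => (List.range' 1 (m-1)).foldl
          (fun F j => pvLset2 F i j
            (pvGet2 C i j + max ((F.getD (i-1) []).getD j 0) ((F.getD i []).getD (j-1) 0))) F)
        ((List.range' 1 (n-1)).foldl
          (fun F i => pvLset2 F i 0 (pvGet2 C i 0 + (F.getD (i-1) []).getD 0 0))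
          ((List.range' 1 (m-1)).foldl
            (fun F j => pvLset2 F 0 j (pvGet2 C 0 j + (F.getD 0 []).getD (j-1) 0))
            (pvLset2 (List.replicate n (List.replicate m 0)) 0 0 (pvGet2 C 0 0))))) := by
  apply foldl_range'_inv
  · obtain ⟨hsh, hrow, hcol, hzero⟩ := phase2 C n m hn hm
    refine ⟨hsh, ?_, ?_, ?_⟩
    · intro i j hi hj
      interval_cases i
      exact hrow j hj
    · intro i hi hile
      exact hcol i hi hile
    · intro i j hi hj
      exact hzero i j hi hj
  · rintro k G hk ⟨hsh, hdone, hcol, hzero⟩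
    -- inner loop over row 1+k, via the generic fold invariant (the fold state F is abstract)
    have main := foldl_range'_inv
      (fun F j => pvLset2 F (1+k) j
        (pvGet2 C (1+k) j + max ((F.getD (1+k-1) []).getD j 0) ((F.getD (1+k) []).getD (j-1) 0)))
      (fun t F => ShapeF n m F ∧ (∀ i j, i ≤ k → j < m → Etab F i j = dpF C i j) ∧
        (∀ j, j ≤ t → Etab F (1+k) j = dpF C (1+k) j) ∧
        (∀ i, 1+k < i → i ≤ n - 1 → Etab F i 0 = dpF C i 0) ∧
        (∀ i j, 1+k < i → 1 ≤ j → Etab F i j = 0))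
      G (m-1) ?base ?step
    · obtain ⟨hsh', hdone', hrow', hcol', hzero'⟩ := main
      refine ⟨hsh', ?_, ?_, ?_⟩
      · intro i j hi hj
        by_cases hik : i = 1+k
        · subst hik; exact hrow' j (by omega)
        · exact hdone' i j (by omega) hj
      · intro i hi hile
        exact hcol' i (by omega) hile
      · intro i j hi hj
        exact hzero' i j (by omega) hj
    case base =>
      refine ⟨hsh, fun i j hi hj => hdone i j (by omega) hj,
        ?_, fun i hi hile => hcol i (by omega) hile,
        fun i j hi hj => hzero i j (by omega) hj⟩
      intro j hj
      interval_cases j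
      exact hcol (1+k) (by omega) (by omega)
    case step =>
      rintro t F ht ⟨hsh', hdone', hrow', hcol', hzero'⟩
      have hup : (F.getD (1+k-1) []).getD (1+t) 0 = dpF C k (1+t) := by
        have h1 : (1:Nat)+k-1 = k := by omega
        rw [h1]
        exact hdone' k (1+t) le_rfl (by omega)
      have hleft : (F.getD (1+k) []).getD (1+t-1) 0 = dpF C (1+k) t := by
        have h1 : (1:Nat)+t-1 = t := by omega
        rw [h1]
        exact hrow' t le_rfl
      refine ⟨shape_lset2 hsh' _ _ _, ?_, ?_, ?_, ?_⟩
      · intro i j hi hj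
        rw [Etab_lset2_ne _ (Or.inl (by omega))]
        exact hdone' i j hi hj
      · intro j hj
        by_cases hje : j = 1+t
        · subst hje
          beta_reduce
          rw [hup, hleft, Etab_lset2_self hsh' _ (by omega) (by omega)]
          have e1 : (1:Nat)+k = k+1 := by omega
          have e2 : (1:Nat)+t = t+1 := by omega
          rw [e1, e2]
          simp [dpF]
        · rw [Etab_lset2_ne _ (Or.inr hje)]
          exact hrow' j (by omega)
      · intro i hi hile
        rw [Etab_lset2_ne _ (Or.inl (by omega))]
        exact hcol' i hi hile
      · intro i j hi hj
        rw [Etab_lset2_ne _ (Or.inl (by omega))]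
        exact hzero' i j hi hj

theorem coletor_A_eq_dp (C : List (List Int)) (h : Pre_coletor C) :
    coletor C = dpF C (C.length - 1) ((C.headD []).length - 1) := by
  obtain ⟨hne, hm, -⟩ := h
  have hn : 1 ≤ C.length := by cases C with | nil => simp at hne | cons a l => simp
  obtain ⟨-, hdone, -, -⟩ := phase3 C C.length (C.headD []).length hn hm
  exact hdone (C.length - 1) ((C.headD []).length - 1) le_rfl (by omega)

-- ---------- B side ----------

-- every value cached in the memo is the recurrence's value
def MemoOK (C : List (List Int)) (memo : PySem.Dict (Nat × Nat) Int) : Prop :=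
  ∀ i j v, memo.get? (i, j) = some v → v = dpF C i j

theorem memoOK_insert {C : List (List Int)} {memo : PySem.Dict (Nat × Nat) Int}
    (h : MemoOK C memo) {i j : Nat} {v : Int} (hv : v = dpF C i j) :
    MemoOK C (memo.insert (i, j) v) := by
  intro i' j' v' h'
  rw [PySem.Dict.get?_insert] at h'
  split_ifs at h' with he
  · obtain ⟨rfl, rfl⟩ := Prod.mk.injEq .. ▸ (Prod.ext_iff.mp he)
    exact (Option.some.injEq .. ▸ h').symm ▸ hv
  · exact h i' j' v' h'

theorem recB_correct (C : List (List Int)) :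
    ∀ N i j memo, i + j ≤ N → MemoOK C memo →
      (recB C i j memo).1 = dpF C i j ∧ MemoOK C (recB C i j memo).2 := by
  intro N
  induction N with
  | zero =>
      intro i j memo hle hok
      have hi : i = 0 := by omega
      have hj : j = 0 := by omega
      subst hi; subst hj
      rw [recB]
      cases hmem : memo.get? (0, 0) with
      | some v => exact ⟨hok 0 0 v hmem, hok⟩
      | none =>
          simp only []
          exact ⟨by simp [dpF], memoOK_insert hok (by simp [dpF])⟩
  | succ N ih =>
      intro i j memo hle hok
      rw [recB]
      cases hmem : memo.get? (i, j) with
      | some v => exact ⟨hok i j v hmem, hok⟩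
      | none =>
          by_cases hi : i = 0
          · by_cases hj : j = 0
            · subst hi; subst hj
              simp only []
              exact ⟨by simp [dpF], memoOK_insert hok (by simp [dpF])⟩
            · subst hi
              obtain ⟨t, rfl⟩ := Nat.exists_eq_succ_of_ne_zero hj
              simp only [dif_neg hj]
              obtain ⟨h1, h2⟩ := ih 0 (t+1-1) memo (by omega) hok
              have hval : pvGet2 C 0 (t+1) + (recB C 0 (t+1-1) memo).1 = dpF C 0 (t+1) := by
                rw [h1]; simp [dpF]
              exact ⟨hval, memoOK_insert h2 hval⟩
          · by_cases hj : j = 0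
            · subst hj
              obtain ⟨s, rfl⟩ := Nat.exists_eq_succ_of_ne_zero hi
              simp only [dif_neg hi]
              obtain ⟨h1, h2⟩ := ih (s+1-1) 0 memo (by omega) hok
              have hval : pvGet2 C (s+1) 0 + (recB C (s+1-1) 0 memo).1 = dpF C (s+1) 0 := by
                rw [h1]; simp [dpF]
              exact ⟨hval, memoOK_insert h2 hval⟩
            · obtain ⟨s, rfl⟩ := Nat.exists_eq_succ_of_ne_zero hi
              obtain ⟨t, rfl⟩ := Nat.exists_eq_succ_of_ne_zero hj
              simp only [dif_neg hi, dif_neg hj]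
              obtain ⟨h1, h2⟩ := ih (s+1-1) (t+1) memo (by omega) hok
              obtain ⟨h3, h4⟩ := ih (s+1) (t+1-1) (recB C (s+1-1) (t+1) memo).2 (by omega) h2
              have hval : pvGet2 C (s+1) (t+1) +
                  max (recB C (s+1-1) (t+1) memo).1
                      (recB C (s+1) (t+1-1) (recB C (s+1-1) (t+1) memo).2).1
                  = dpF C (s+1) (t+1) := by
                rw [h1, h3]; simp [dpF]
              exact ⟨hval, memoOK_insert h4 hval⟩

theorem coletor_B_eq_dp (C : List (List Int)) :
    coletor_alt C = dpF C (C.length - 1) ((C.headD []).length - 1) := by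
  have hok : MemoOK C PySem.Dict.empty := by
    intro i j v h
    rw [PySem.Dict.get?_empty] at h
    exact absurd h (by simp)
  exact (recB_correct C (C.length - 1 + ((C.headD []).length - 1))
    (C.length - 1) ((C.headD []).length - 1) PySem.Dict.empty le_rfl hok).1

-- ===== VERDICT (by name: the statement is the Claim_ definition above) =====
theorem coletor_spec : Claim_equal_coletor := by
  intro C _ h
  unfold Spec_coletor
  rw [coletor_A_eq_dp C h, coletor_B_eq_dp C]
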